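-- pv_equiv track=rewrite | github.com/SuikaXhq/works | python/data-structure/source/sun_yat_sen_mausoleum_problem/matrix_step.py | matrix_solve
-- ===== SOURCE A (Python) =====
-- def matrix_solve(n):
--     '''
--     时间复杂度O(logn)
--     '''
--     if n <= 0:
--         return 0
--
--     p = [[1,1,1],
--          [1,0,0],
--          [0,1,0]]#本题的递推矩阵
--
--     res = [[1,0,0],
--            [0,1,0],
--            [0,0,1]]#初始化为单位矩阵
--
--     while n != 0:
--         if n&1 == 1:
--             res = matrix_multiply(res, p)
--         n >>= 1
--         p = matrix_multiply(p, p)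
--
--     return res[0][0]
--
-- def matrix_multiply(m, n):#矩阵乘法
--     res = [[0,0,0],
--            [0,0,0],
--            [0,0,0]]
--     for i in range(3):
--         for j in range(3):
--             for k in range(3):
--                 res[i][j] += m[i][k] * n[k][j]
--     return res
-- ===== SOURCE B (Python) =====
-- def matrix_solve(n):
--     if n <= 0:
--         return 0
--     a, b, c = 0, 0, 1
--     for _ in range(n):
--         a, b, c = b, c, a + b + c
--     return c
-- ===== Notes on version B (the rewrite author's own statement) =====
-- stated objective: simpler
-- what changed: Replaced binary 3x3 matrix exponentiation (matrix_multiply helper plus while-loop on the bits of n) by a direct linear pass maintaining three rolling tribonacci values (a,b,c) seeded (0,0,1).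
import Mathlib
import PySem

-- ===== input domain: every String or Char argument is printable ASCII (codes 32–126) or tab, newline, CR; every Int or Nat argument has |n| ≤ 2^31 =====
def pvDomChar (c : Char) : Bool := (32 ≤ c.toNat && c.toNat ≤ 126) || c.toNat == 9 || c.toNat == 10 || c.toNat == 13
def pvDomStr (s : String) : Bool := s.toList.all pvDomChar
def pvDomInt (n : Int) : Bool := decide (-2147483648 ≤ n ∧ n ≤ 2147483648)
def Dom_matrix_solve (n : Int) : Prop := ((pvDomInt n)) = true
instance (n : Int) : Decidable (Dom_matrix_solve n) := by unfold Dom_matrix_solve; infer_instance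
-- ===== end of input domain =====

-- B replaces A's binary 3x3 matrix exponentiation by a linear rolling-triple pass; proved to return the same value for every n.

-- ===== PORT A =====
-- 3x3 integer matrix, entries row by row (a11 = res[0][0], …).
structure M3 where
  a11 : Int
  a12 : Int
  a13 : Int
  a21 : Int
  a22 : Int
  a23 : Int
  a31 : Int
  a32 : Int
  a33 : Int
deriving DecidableEq, Repr

-- matrix_multiply: each res[i][j] accumulates 0 + m[i][0]*n[0][j] + m[i][1]*n[1][j] + m[i][2]*n[2][j] (k = 0,1,2 in order).
def matMul (m n : M3) : M3 :=
  ⟨0 + m.a11 * n.a11 + m.a12 * n.a21 + m.a13 * n.a31,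
   0 + m.a11 * n.a12 + m.a12 * n.a22 + m.a13 * n.a32,
   0 + m.a11 * n.a13 + m.a12 * n.a23 + m.a13 * n.a33,
   0 + m.a21 * n.a11 + m.a22 * n.a21 + m.a23 * n.a31,
   0 + m.a21 * n.a12 + m.a22 * n.a22 + m.a23 * n.a32,
   0 + m.a21 * n.a13 + m.a22 * n.a23 + m.a23 * n.a33,
   0 + m.a31 * n.a11 + m.a32 * n.a21 + m.a33 * n.a31,
   0 + m.a31 * n.a12 + m.a32 * n.a22 + m.a33 * n.a32,
   0 + m.a31 * n.a13 + m.a32 * n.a23 + m.a33 * n.a33⟩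

def pMat : M3 := ⟨1, 1, 1, 1, 0, 0, 0, 1, 0⟩
def idMat : M3 := ⟨1, 0, 0, 0, 1, 0, 0, 0, 1⟩

-- the while loop: n (already known ≥ 1, so tracked as a Nat), res, p; n&1 → k % 2, n >>= 1 → k / 2.
def loopA (k : Nat) (res p : M3) : M3 :=
  if h : k = 0 then res
  else loopA (k / 2) (if k % 2 = 1 then matMul res p else res) (matMul p p)
termination_by k
decreasing_by exact Nat.div_lt_self (Nat.pos_of_ne_zero h) (by decide)

def matrix_solve (n : Int) : Int :=
  if n ≤ 0 then 0
  else (loopA n.toNat idMat pMat).a11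

-- ===== PORT B =====
-- rolling triple (a, b, c); k iterations of a,b,c = b,c,a+b+c, then return c.
def tribGo (k : Nat) (t : Int × Int × Int) : Int :=
  match k with
  | 0 => t.2.2
  | k + 1 => tribGo k (t.2.1, t.2.2, t.1 + t.2.1 + t.2.2)

def matrix_solve_alt (n : Int) : Int :=
  if n ≤ 0 then 0
  else tribGo n.toNat (0, 0, 1)

-- ===== PRECONDITION & SPEC =====
def Spec_matrix_solve (n : Int) (out : Int) : Prop := out = matrix_solve_alt n
instance (n : Int) (out : Int) : Decidable (Spec_matrix_solve n out) := by unfold Spec_matrix_solve; infer_instance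

-- ===== CLAIM (what is proved, stated in full; the proofs are below) =====
def Claim_equal_matrix_solve : Prop := ∀ (n : Int), Dom_matrix_solve n → Spec_matrix_solve n (matrix_solve n)

-- ===== LEMMAS AND PROOFS =====

def powMat (q : M3) : Nat → M3
  | 0 => idMat
  | k + 1 => matMul (powMat q k) q

lemma matMul_id_left (x : M3) : matMul idMat x = x := by
  cases x; simp [matMul, idMat]

lemma matMul_id_right (x : M3) : matMul x idMat = x := by
  cases x; simp only [matMul, idMat, M3.mk.injEq]; and_intros <;> ring

lemma matMul_assoc (x y z : M3) : matMul (matMul x y) z = matMul x (matMul y z) := by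
  cases x; cases y; cases z; simp only [matMul, M3.mk.injEq]; and_intros <;> ring

lemma pow_comm (q : M3) (k : Nat) : matMul q (powMat q k) = matMul (powMat q k) q := by
  induction k with
  | zero => rw [powMat, matMul_id_left, matMul_id_right]
  | succ k ih => rw [powMat, ← matMul_assoc, ih]

lemma pow_sq (q : M3) (m : Nat) : powMat (matMul q q) m = powMat q (2 * m) := by
  induction m with
  | zero => rfl
  | succ m ih =>
    have h2 : 2 * (m + 1) = (2 * m + 1) + 1 := by ring
    rw [powMat, ih, h2, powMat, powMat, matMul_assoc]

lemma loopA_eq (k : Nat) : ∀ res q : M3, loopA k res q = matMul res (powMat q k) := by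
  induction k using Nat.strong_induction_on with
  | _ k ih =>
    intro res q
    rw [loopA]
    by_cases h : k = 0
    · simp [h, powMat, matMul_id_right]
    · simp only [h, dif_neg, not_false_iff]
      rw [ih (k / 2) (Nat.div_lt_self (Nat.pos_of_ne_zero h) (by decide)), pow_sq]
      rcases Nat.mod_two_eq_zero_or_one k with hm | hm
      · have hk2 : 2 * (k / 2) = k := by omega
        rw [if_neg (by omega), hk2]
      · have hk2 : k = 2 * (k / 2) + 1 := by omega
        rw [if_pos hm]
        conv_rhs => rw [hk2]
        rw [powMat, matMul_assoc, pow_comm]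

def stepT (t : Int × Int × Int) : Int × Int × Int := (t.2.1, t.2.2, t.1 + t.2.1 + t.2.2)

lemma tribGo_eq (k : Nat) : ∀ t, tribGo k t = (stepT^[k] t).2.2 := by
  induction k with
  | zero => intro t; rfl
  | succ k ih =>
    intro t
    rw [tribGo, Function.iterate_succ_apply]
    exact ih (stepT t)

-- the matrix p^k, expressed through the rolling triple (a, b, c) = stepT^[k] (0,0,1)
def matOf (t : Int × Int × Int) : M3 :=
  ⟨t.2.2, t.1 + t.2.1, t.2.1,
   t.2.1, t.2.2 - t.2.1, t.1,
   t.1, t.2.1 - t.1, t.2.2 - t.2.1 - t.1⟩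

lemma matOf_step (t : Int × Int × Int) : matMul (matOf t) pMat = matOf (stepT t) := by
  obtain ⟨a, b, c⟩ := t
  simp only [matMul, matOf, stepT, pMat, M3.mk.injEq]
  and_intros <;> ring

lemma pow_p (k : Nat) : powMat pMat k = matOf (stepT^[k] (0, 0, 1)) := by
  induction k with
  | zero => rfl
  | succ k ih =>
    rw [powMat, ih, matOf_step, Function.iterate_succ_apply']

lemma core (k : Nat) : (loopA k idMat pMat).a11 = tribGo k (0, 0, 1) := by
  rw [loopA_eq, matMul_id_left, pow_p, tribGo_eq]
  rfl

-- ===== VERDICT (by name: the statement is the Claim_ definition above) =====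
theorem matrix_solve_spec : Claim_equal_matrix_solve := by
  intro n _
  unfold Spec_matrix_solve matrix_solve matrix_solve_alt
  by_cases h : n ≤ 0
  · simp [h]
  · simp [h, core]
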